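-- pv_equiv track=rewrite | github.com/GSA/https | compliance/bod-18-01/utils.py | compliance_totals
-- ===== SOURCE A (Python) =====
-- def compliance_totals(data, preload_pending, preloaded):
--     total_report = {
--         'enforces': 0,
--         'hsts': 0,
--         'bod_crypto': 0,
--         'compliant': 0,
--         'rc4': 0,
--         '3des': 0
--     }
--
--     for domain in data.keys():
--         # calculated in compliance_for() method using pshtt data
--         report = data[domain]['compliance']
--
--         # Needs to be Default or Strict to be 'Yes'
--         if report['enforces'] >= 2:
--             total_report['enforces'] += 1
--
--         # Needs to be present with >= 1 year max-age for canonical endpoint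
--         if report['hsts'] >= 2:
--             total_report['hsts'] += 1
--
--         if report['bod_crypto'] == 1:
--             total_report['bod_crypto'] += 1
--
--         if report['compliant']:
--             total_report['compliant'] += 1
--
--         if report['rc4']:
--             total_report['rc4'] += 1
--
--         if report['3des']:
--             total_report['3des'] += 1
--
--     return total_report
-- ===== SOURCE B (Python) =====
-- def compliance_totals(data, preload_pending, preloaded):
--     reports = [d['compliance'] for d in data.values()]
--     return {
--         'enforces': sum(1 for r in reports if r['enforces'] >= 2),
--         'hsts': sum(1 for r in reports if r['hsts'] >= 2),
--         'bod_crypto': sum(1 for r in reports if r['bod_crypto'] == 1),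
--         'compliant': sum(1 for r in reports if r['compliant']),
--         'rc4': sum(1 for r in reports if r['rc4']),
--         '3des': sum(1 for r in reports if r['3des']),
--     }
-- ===== Notes on version B (the rewrite author's own statement) =====
-- stated objective: simpler
-- what changed: Replaces the single loop mutating six accumulators with a dict literal whose six counts are each computed by an independent scan (sum of a predicate) over the extracted compliance reports.
import Mathlib
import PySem

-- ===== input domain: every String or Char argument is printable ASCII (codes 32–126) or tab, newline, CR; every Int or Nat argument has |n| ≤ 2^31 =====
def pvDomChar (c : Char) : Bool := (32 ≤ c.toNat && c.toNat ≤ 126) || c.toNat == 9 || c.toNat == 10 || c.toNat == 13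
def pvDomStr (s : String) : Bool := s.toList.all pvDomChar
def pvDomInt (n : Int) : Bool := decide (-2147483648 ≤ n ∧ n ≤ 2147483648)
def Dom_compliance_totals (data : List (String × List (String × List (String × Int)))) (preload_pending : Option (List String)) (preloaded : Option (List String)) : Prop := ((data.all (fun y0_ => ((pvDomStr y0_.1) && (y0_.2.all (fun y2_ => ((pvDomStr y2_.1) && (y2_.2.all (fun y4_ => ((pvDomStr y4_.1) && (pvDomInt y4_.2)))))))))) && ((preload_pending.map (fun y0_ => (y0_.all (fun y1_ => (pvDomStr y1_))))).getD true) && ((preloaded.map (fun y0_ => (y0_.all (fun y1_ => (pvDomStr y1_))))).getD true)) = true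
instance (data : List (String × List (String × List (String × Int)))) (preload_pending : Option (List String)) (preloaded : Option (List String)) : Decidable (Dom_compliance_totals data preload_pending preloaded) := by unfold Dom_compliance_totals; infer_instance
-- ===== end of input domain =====

-- B replaces A's single loop over six mutable accumulators by six independent predicate-count scans (simpler decomposition; same cost).

-- first-match association-list lookup with default (Python dict lookup; default only reached outside Pre_)
def pvLookupD {α : Type} (d : List (String × α)) (k : String) (dflt : α) : α :=
  ((d.find? (fun p => p.1 == k)).map (·.2)).getD dflt

-- ===== PORT A =====
def compliance_totals (data : List (String × List (String × List (String × Int)))) (preload_pending : Option (List String)) (preloaded : Option (List String)) : List (String × Int) :=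
  let t := data.foldl
    (fun (acc : Int × Int × Int × Int × Int × Int) dom =>
      let report := pvLookupD dom.2 "compliance" []
      let a1 := if pvLookupD report "enforces" 0 ≥ 2 then acc.1 + 1 else acc.1
      let a2 := if pvLookupD report "hsts" 0 ≥ 2 then acc.2.1 + 1 else acc.2.1
      let a3 := if pvLookupD report "bod_crypto" 0 = 1 then acc.2.2.1 + 1 else acc.2.2.1
      let a4 := if pvLookupD report "compliant" 0 ≠ 0 then acc.2.2.2.1 + 1 else acc.2.2.2.1
      let a5 := if pvLookupD report "rc4" 0 ≠ 0 then acc.2.2.2.2.1 + 1 else acc.2.2.2.2.1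
      let a6 := if pvLookupD report "3des" 0 ≠ 0 then acc.2.2.2.2.2 + 1 else acc.2.2.2.2.2
      (a1, a2, a3, a4, a5, a6))
    (0, 0, 0, 0, 0, 0)
  [("enforces", t.1), ("hsts", t.2.1), ("bod_crypto", t.2.2.1),
   ("compliant", t.2.2.2.1), ("rc4", t.2.2.2.2.1), ("3des", t.2.2.2.2.2)]

-- ===== PORT B =====
def pvCount (reports : List (List (String × Int))) (k : String) (pred : Int → Bool) : Int :=
  ((reports.countP (fun r => pred (pvLookupD r k 0)) : Nat) : Int)

def compliance_totals_alt (data : List (String × List (String × List (String × Int)))) (preload_pending : Option (List String)) (preloaded : Option (List String)) : List (String × Int) :=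
  let reports := data.map (fun d => pvLookupD d.2 "compliance" [])
  [("enforces", pvCount reports "enforces" (fun v => v ≥ 2)),
   ("hsts", pvCount reports "hsts" (fun v => v ≥ 2)),
   ("bod_crypto", pvCount reports "bod_crypto" (fun v => v = 1)),
   ("compliant", pvCount reports "compliant" (fun v => v ≠ 0)),
   ("rc4", pvCount reports "rc4" (fun v => v ≠ 0)),
   ("3des", pvCount reports "3des" (fun v => v ≠ 0))]

-- ===== PRECONDITION & SPEC =====
-- Pre_ excludes exactly the inputs where Python A raises KeyError: a domain value missing
-- the 'compliance' key, or a compliance dict missing one of the six counted keys.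
def Pre_compliance_totals (data : List (String × List (String × List (String × Int)))) (preload_pending : Option (List String)) (preloaded : Option (List String)) : Prop :=
  data.all (fun dom =>
    match dom.2.find? (fun p => p.1 == "compliance") with
    | some c => ["enforces", "hsts", "bod_crypto", "compliant", "rc4", "3des"].all
        (fun k => (c.2.find? (fun p => p.1 == k)).isSome)
    | none => false) = true
instance (data : List (String × List (String × List (String × Int)))) (preload_pending : Option (List String)) (preloaded : Option (List String)) : Decidable (Pre_compliance_totals data preload_pending preloaded) := by unfold Pre_compliance_totals; infer_instance

def pvWitness_compliance_totals : (List (String × List (String × List (String × Int)))) × Option (List String) × Option (List String) :=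
  ([("x.gov", [("compliance", [("enforces", 2), ("hsts", 1), ("bod_crypto", 1), ("compliant", 0), ("rc4", 3), ("3des", 0)])])], none, none)

def Spec_compliance_totals (data : List (String × List (String × List (String × Int)))) (preload_pending : Option (List String)) (preloaded : Option (List String)) (out : List (String × Int)) : Prop := out = compliance_totals_alt data preload_pending preloaded
instance (data : List (String × List (String × List (String × Int)))) (preload_pending : Option (List String)) (preloaded : Option (List String)) (out : List (String × Int)) : Decidable (Spec_compliance_totals data preload_pending preloaded out) := by unfold Spec_compliance_totals; infer_instance

-- ===== CLAIM (what is proved, stated in full; the proofs are below) =====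
def Claim_equal_compliance_totals : Prop := ∀ (data : List (String × List (String × List (String × Int)))) (preload_pending : Option (List String)) (preloaded : Option (List String)), Dom_compliance_totals data preload_pending preloaded → Pre_compliance_totals data preload_pending preloaded → Spec_compliance_totals data preload_pending preloaded (compliance_totals data preload_pending preloaded)

-- ===== LEMMAS AND PROOFS =====

-- loop invariant: A's foldl adds B's six predicate counts componentwise to the accumulator
theorem foldA_eq (data : List (String × List (String × List (String × Int))))
    (acc : Int × Int × Int × Int × Int × Int) :
    data.foldl
      (fun (acc : Int × Int × Int × Int × Int × Int) dom =>
        let report := pvLookupD dom.2 "compliance" []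
        let a1 := if pvLookupD report "enforces" 0 ≥ 2 then acc.1 + 1 else acc.1
        let a2 := if pvLookupD report "hsts" 0 ≥ 2 then acc.2.1 + 1 else acc.2.1
        let a3 := if pvLookupD report "bod_crypto" 0 = 1 then acc.2.2.1 + 1 else acc.2.2.1
        let a4 := if pvLookupD report "compliant" 0 ≠ 0 then acc.2.2.2.1 + 1 else acc.2.2.2.1
        let a5 := if pvLookupD report "rc4" 0 ≠ 0 then acc.2.2.2.2.1 + 1 else acc.2.2.2.2.1
        let a6 := if pvLookupD report "3des" 0 ≠ 0 then acc.2.2.2.2.2 + 1 else acc.2.2.2.2.2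
        (a1, a2, a3, a4, a5, a6)) acc =
    (acc.1 + pvCount (data.map (fun d => pvLookupD d.2 "compliance" [])) "enforces" (fun v => v ≥ 2),
     acc.2.1 + pvCount (data.map (fun d => pvLookupD d.2 "compliance" [])) "hsts" (fun v => v ≥ 2),
     acc.2.2.1 + pvCount (data.map (fun d => pvLookupD d.2 "compliance" [])) "bod_crypto" (fun v => v = 1),
     acc.2.2.2.1 + pvCount (data.map (fun d => pvLookupD d.2 "compliance" [])) "compliant" (fun v => v ≠ 0),
     acc.2.2.2.2.1 + pvCount (data.map (fun d => pvLookupD d.2 "compliance" [])) "rc4" (fun v => v ≠ 0),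
     acc.2.2.2.2.2 + pvCount (data.map (fun d => pvLookupD d.2 "compliance" [])) "3des" (fun v => v ≠ 0)) := by
  induction data generalizing acc with
  | nil => simp [pvCount]
  | cons hd tl ih =>
      simp only [List.foldl_cons]
      rw [ih]
      simp only [List.map_cons, pvCount, List.countP_cons, Prod.mk.injEq]
      refine ⟨?_, ?_, ?_, ?_, ?_, ?_⟩ <;>
        · simp only [decide_eq_true_eq, ge_iff_le]
          push_cast
          split_ifs with h <;> omega

-- ===== VERDICT (by name: the statement is the Claim_ definition above) =====
theorem compliance_totals_spec : Claim_equal_compliance_totals := by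
  intro data _ _ _ _
  unfold Spec_compliance_totals compliance_totals compliance_totals_alt
  rw [foldA_eq]
  simp
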